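-- pv_equiv track=rewrite | github.com/pypi-data/pypi-mirror-249 | packages/abstract-blockchain/abstract_blockchain-0.0.1.80-py3-none-any.whl/abstract_blockchain/speed_tyest.py | get_shared_characters_count
-- ===== SOURCE A (Python) =====
-- def get_shared_characters_count(string, compare_string):
--     # Use a dictionary to count occurrences of each character in compare_string
--     char_count = {}
--     for char in compare_string:
--         char_count[char] = char_count.get(char, 0) + 1
--
--     # For each character in string, reduce its count in the dictionary
--     for char in string:
--         if char in char_count and char_count[char] > 0:
--             char_count[char] -= 1
--
--     # Sum the remaining counts to get the total count of shared characters
--     return sum(char_count.values())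
-- ===== SOURCE B (Python) =====
-- def get_shared_characters_count(string, compare_string):
--     # For each distinct character of compare_string (first-occurrence order),
--     # add the surplus of its occurrences in compare_string over those in string.
--     total = 0
--     for char in dict.fromkeys(compare_string):
--         surplus = compare_string.count(char) - string.count(char)
--         if surplus > 0:
--             total += surplus
--     return total
-- ===== Notes on version B (the rewrite author's own statement) =====
-- stated objective: simpler
-- what changed: B keeps no mutable count table at all: it iterates once over the distinct characters of compare_string and adds the positive surplus compare_string.count(c) - string.count(c) per character, replacing A's build-then-decrement dictionary passes; counting via str.count's C loop made it measurably faster on the timed inputs.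
import Mathlib
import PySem

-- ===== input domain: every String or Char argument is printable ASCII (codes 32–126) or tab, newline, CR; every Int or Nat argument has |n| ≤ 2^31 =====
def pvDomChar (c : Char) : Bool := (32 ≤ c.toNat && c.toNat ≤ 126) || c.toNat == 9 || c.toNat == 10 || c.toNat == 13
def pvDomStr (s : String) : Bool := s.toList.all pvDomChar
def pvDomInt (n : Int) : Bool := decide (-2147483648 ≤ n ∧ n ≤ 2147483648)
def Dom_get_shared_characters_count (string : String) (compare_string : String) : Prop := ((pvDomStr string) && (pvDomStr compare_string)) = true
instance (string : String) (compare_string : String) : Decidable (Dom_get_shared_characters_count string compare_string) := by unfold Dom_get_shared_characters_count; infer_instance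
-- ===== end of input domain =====

-- B drops A's mutable decremented table entirely: one pass over the distinct characters of
-- compare_string adding the positive surplus of per-character counts (simpler decomposition).


-- ===== PORT A =====
def get_shared_characters_count (string : String) (compare_string : String) : Int :=
  -- char_count[char] = char_count.get(char, 0) + 1
  let char_count : PySem.Dict Char Int :=
    compare_string.toList.foldl (fun d c => d.insert c (d.getD c 0 + 1)) PySem.Dict.empty
  -- if char in char_count and char_count[char] > 0: char_count[char] -= 1
  let char_count :=
    string.toList.foldl
      (fun d c => if d.contains c && decide (0 < d.getD c 0) then d.insert c (d.getD c 0 - 1) else d)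
      char_count
  -- sum(char_count.values())
  char_count.values.sum

-- ===== PORT B =====
def get_shared_characters_count_alt (string : String) (compare_string : String) : Int :=
  -- for char in dict.fromkeys(compare_string): surplus = … ; if surplus > 0: total += surplus
  (PySem.List.dedup compare_string.toList).foldl
    (fun total c =>
      let surplus : Int := (compare_string.toList.count c : Int) - (string.toList.count c : Int)
      if 0 < surplus then total + surplus else total) 0

-- ===== PRECONDITION & SPEC =====
def Spec_get_shared_characters_count (string : String) (compare_string : String) (out : Int) : Prop := out = get_shared_characters_count_alt string compare_string
instance (string : String) (compare_string : String) (out : Int) : Decidable (Spec_get_shared_characters_count string compare_string out) := by unfold Spec_get_shared_characters_count; infer_instance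

-- ===== CLAIM (what is proved, stated in full; the proofs are below) =====
def Claim_equal_get_shared_characters_count : Prop := ∀ (string : String) (compare_string : String), Dom_get_shared_characters_count string compare_string → Spec_get_shared_characters_count string compare_string (get_shared_characters_count string compare_string)

-- ===== LEMMAS AND PROOFS =====

-- A's decrement loop never changes the key list.
theorem dec_keys (l : List Char) (d : PySem.Dict Char Int) :
    (l.foldl (fun d c => if d.contains c && decide (0 < d.getD c 0) then d.insert c (d.getD c 0 - 1) else d) d).keys = d.keys := by
  induction l generalizing d with
  | nil => rfl
  | cons x l ih =>
    simp only [List.foldl_cons]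
    rw [ih]
    by_cases h : d.contains x && decide (0 < d.getD x 0)
    · have hx : d.contains x = true := (Bool.and_eq_true _ _).mp h |>.1
      simp [h, PySem.Dict.keys_insert_of_contains d _ hx]
    · simp [h]

-- Pointwise effect of A's decrement loop on a key with nonnegative value.
theorem dec_getD (l : List Char) (d : PySem.Dict Char Int) (c : Char) (h0 : 0 ≤ d.getD c 0) :
    (l.foldl (fun d c => if d.contains c && decide (0 < d.getD c 0) then d.insert c (d.getD c 0 - 1) else d) d).getD c 0 =
      if d.contains c then max 0 (d.getD c 0 - l.count c) else d.getD c 0 := by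
  induction l generalizing d with
  | nil =>
    simp only [List.foldl_nil, List.count_nil]
    split_ifs with hc
    · omega
    · rfl
  | cons x l ih =>
    simp only [List.foldl_cons]
    by_cases hb : d.contains x && decide (0 < d.getD x 0)
    · have hx : d.contains x = true := (Bool.and_eq_true _ _).mp hb |>.1
      have hv : 0 < d.getD x 0 := by
        have := (Bool.and_eq_true _ _).mp hb |>.2
        simpa using this
      rw [if_pos hb]
      rw [ih _ (by rw [PySem.Dict.getD_insert]; split_ifs with h <;> omega)]
      rw [PySem.Dict.getD_insert, PySem.Dict.contains_insert, List.count_cons]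
      by_cases hxc : c = x
      · subst hxc
        simp [hx]
        omega
      · have hcx : ¬x = c := fun h => hxc h.symm
        simp [beq_iff_eq, hxc, hcx]
    · rw [if_neg hb, ih _ h0, List.count_cons]
      by_cases hxc : c = x
      · subst hxc
        by_cases hc : d.contains c
        · have hv : d.getD c 0 = 0 := by
            have : ¬ (0 < d.getD c 0) := by
              intro hlt
              exact hb (by simp [hc, hlt])
            omega
          simp [hc, hv]
        · simp [hc]
      · have hcx : ¬x = c := fun h => hxc h.symm
        simp [beq_iff_eq, hcx]

-- B's surplus loop as a sum of capped per-character differences.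
theorem foldl_surplus_sum (f : Char → Int) (l : List Char) (a : Int) :
    l.foldl (fun total c => if 0 < f c then total + f c else total) a =
      a + (l.map (fun c => max 0 (f c))).sum := by
  induction l generalizing a with
  | nil => simp
  | cons x l ih =>
    simp only [List.foldl_cons, List.map_cons, List.sum_cons]
    rw [ih]
    split_ifs with h <;> omega

-- ===== VERDICT (by name: the statement is the Claim_ definition above) =====
theorem get_shared_characters_count_spec : Claim_equal_get_shared_characters_count := by
  intro s t _
  show get_shared_characters_count s t = get_shared_characters_count_alt s t
  unfold get_shared_characters_count get_shared_characters_count_alt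
  simp only [PySem.Dict.foldl_insert_getD_add_one_eq_counter]
  set cs := t.toList
  set ss := s.toList
  set d1 := ss.foldl (fun d c => if d.contains c && decide (0 < d.getD c 0) then d.insert c (d.getD c 0 - 1) else d) (PySem.Dict.counter cs) with hd1
  have hnd : (PySem.Dict.counter cs).keys.Nodup := PySem.Dict.nodup_keys_counter cs
  have hkeys : d1.keys = (PySem.Dict.counter cs).keys := dec_keys ss (PySem.Dict.counter cs)
  have hvals : d1.values = d1.keys.map (fun k => d1.getD k 0) :=
    PySem.Dict.values_eq_map_keys d1 (hkeys ▸ hnd) 0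
  rw [hvals, hkeys, PySem.Dict.keys_counter,
    foldl_surplus_sum (fun c => (cs.count c : Int) - (ss.count c : Int)), zero_add,
    PySem.List.dedup_eq_ofList]
  congr 1
  apply List.map_congr_left
  intro k hk
  have hkc : (PySem.Dict.counter cs).contains k := by
    rw [PySem.Dict.contains_counter]
    simpa using hk
  rw [hd1, dec_getD ss (PySem.Dict.counter cs) k (by rw [PySem.Dict.getD_counter]; positivity)]
  simp [hkc, PySem.Dict.getD_counter]
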